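-- pv_equiv track=rewrite | github.com/vokzvokz/voice_emotion_recognition_itmo | data_extraction.py | rename_list_of_files
-- ===== SOURCE A (Python) =====
-- def rename_list_of_files(list_of_files):
--     feeling_list = []
--     for item in list_of_files:
--         if item[6:-16] == '02' and int(item[18:-4]) % 2 == 0:
--             feeling_list.append('female_calm')
--         elif item[6:-16] == '02' and int(item[18:-4]) % 2 == 1:
--             feeling_list.append('male_calm')
--         elif item[6:-16] == '03' and int(item[18:-4]) % 2 == 0:
--             feeling_list.append('female_happy')
--         elif item[6:-16] == '03' and int(item[18:-4]) % 2 == 1: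
--             feeling_list.append('male_happy')
--         elif item[6:-16] == '04' and int(item[18:-4]) % 2 == 0:
--             feeling_list.append('female_sad')
--         elif item[6:-16] == '04' and int(item[18:-4]) % 2 == 1:
--             feeling_list.append('male_sad')
--         elif item[6:-16] == '05' and int(item[18:-4]) % 2 == 0:
--             feeling_list.append('female_angry')
--         elif item[6:-16] == '05' and int(item[18:-4]) % 2 == 1:
--             feeling_list.append('male_angry')
--         elif item[6:-16] == '06' and int(item[18:-4]) % 2 == 0:
--             feeling_list.append('female_fearful')
--         elif item[6:-16] == '06' and int(item[18:-4]) % 2 == 1: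
--             feeling_list.append('male_fearful')
--         elif item[:1] == 'a':
--             feeling_list.append('male_angry')
--         elif item[:1] == 'f':
--             feeling_list.append('male_fearful')
--         elif item[:1] == 'h':
--             feeling_list.append('male_happy')
--         # elif item[:1]=='n':
--         # feeling_list.append('neutral')
--         elif item[:2] == 'sa':
--             feeling_list.append('male_sad')
--
--     return feeling_list
-- ===== SOURCE B (Python) =====
-- EMOTION_NAMES = ('calm', 'happy', 'sad', 'angry', 'fearful')
-- GENDERS = ('female', 'male')
-- PREFIX_LABELS = (('a', 'male_angry'), ('f', 'male_fearful'), ('h', 'male_happy'), ('sa', 'male_sad'))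
--
--
-- def classify(item):
--     code = item[6:-16]
--     if len(code) == 2 and code[0] == '0' and '2' <= code[1] <= '6':
--         return GENDERS[int(item[18:-4]) % 2] + '_' + EMOTION_NAMES[ord(code[1]) - 50]
--     for prefix, label in PREFIX_LABELS:
--         if item.startswith(prefix):
--             return label
--     return None
--
--
-- def rename_list_of_files(list_of_files):
--     return [label for label in map(classify, list_of_files) if label is not None]
-- ===== Notes on version B (the rewrite author's own statement) =====
-- stated objective: alternative
-- what changed: B is decomposed into a per-item classify function returning the label or None (emotion picked by character arithmetic on the code digit indexing a name tuple, gender by parity indexing) and the result is built as a map-then-filter comprehension instead of A's single loop with a 14-branch elif chain appending to an accumulator.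
import Mathlib
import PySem

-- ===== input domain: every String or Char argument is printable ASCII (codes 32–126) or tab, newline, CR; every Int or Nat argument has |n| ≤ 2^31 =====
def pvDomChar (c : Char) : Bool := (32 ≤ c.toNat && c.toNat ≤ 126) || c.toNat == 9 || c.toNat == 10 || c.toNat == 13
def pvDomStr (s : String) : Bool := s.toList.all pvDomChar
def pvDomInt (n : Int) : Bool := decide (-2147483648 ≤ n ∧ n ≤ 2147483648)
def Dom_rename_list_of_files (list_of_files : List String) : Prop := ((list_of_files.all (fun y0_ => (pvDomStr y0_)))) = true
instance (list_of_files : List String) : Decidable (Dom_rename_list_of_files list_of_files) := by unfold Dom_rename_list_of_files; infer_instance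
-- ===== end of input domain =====

-- B: a per-item classify function returning Option String (emotion by character arithmetic on the
-- code digit, gender by parity indexing) and a map-then-filter build, instead of A's accumulator
-- loop with a 14-branch elif chain (objective: alternative); same return value wherever A returns.

-- ===== PORT A =====
-- Loop body of A's elif chain; (PySem.Int.ofChars? …).getD 0 is int(item[18:-4]) — the none case
-- (Python ValueError, reachable only when item[6:-16] is one of the five codes) is excluded by Pre_.
def pvStepA (item : String) : List String :=
  let cs := item.toList
  let code := PySem.List.slice cs (some 6) (some (-16))
  let n : Int := (PySem.Int.ofChars? (PySem.List.slice cs (some 18) (some (-4)))).getD 0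
  if code = ['0','2'] ∧ PySem.Int.mod n 2 = 0 then ["female_calm"]
  else if code = ['0','2'] ∧ PySem.Int.mod n 2 = 1 then ["male_calm"]
  else if code = ['0','3'] ∧ PySem.Int.mod n 2 = 0 then ["female_happy"]
  else if code = ['0','3'] ∧ PySem.Int.mod n 2 = 1 then ["male_happy"]
  else if code = ['0','4'] ∧ PySem.Int.mod n 2 = 0 then ["female_sad"]
  else if code = ['0','4'] ∧ PySem.Int.mod n 2 = 1 then ["male_sad"]
  else if code = ['0','5'] ∧ PySem.Int.mod n 2 = 0 then ["female_angry"]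
  else if code = ['0','5'] ∧ PySem.Int.mod n 2 = 1 then ["male_angry"]
  else if code = ['0','6'] ∧ PySem.Int.mod n 2 = 0 then ["female_fearful"]
  else if code = ['0','6'] ∧ PySem.Int.mod n 2 = 1 then ["male_fearful"]
  else if PySem.List.slice cs none (some 1) = ['a'] then ["male_angry"]
  else if PySem.List.slice cs none (some 1) = ['f'] then ["male_fearful"]
  else if PySem.List.slice cs none (some 1) = ['h'] then ["male_happy"]
  else if PySem.List.slice cs none (some 2) = ['s','a'] then ["male_sad"]
  else []

def rename_list_of_files (list_of_files : List String) : List String :=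
  list_of_files.foldl (fun acc item => acc ++ pvStepA item) []

-- ===== PORT B =====
def pvEmotionNames : List String := ["calm", "happy", "sad", "angry", "fearful"]
def pvGenders : List String := ["female", "male"]
def pvPrefixLabels : List (List Char × String) :=
  [(['a'], "male_angry"), (['f'], "male_fearful"), (['h'], "male_happy"), (['s','a'], "male_sad")]

-- classify(item): the guard is len(code)==2 and code[0]=='0' and '2'<=code[1]<='6';
-- ord(code[1]) - 50 indexes EMOTION_NAMES, int(item[18:-4]) % 2 indexes GENDERS.
def pvClassify (item : String) : Option String :=
  let cs := item.toList
  let code := PySem.List.slice cs (some 6) (some (-16))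
  if code.length = 2 ∧ code.getD 0 ' ' = '0' ∧ '2' ≤ code.getD 1 ' ' ∧ code.getD 1 ' ' ≤ '6' then
    some (pvGenders.getD
            (PySem.Int.mod ((PySem.Int.ofChars? (PySem.List.slice cs (some 18) (some (-4)))).getD 0) 2).toNat ""
          ++ "_" ++ pvEmotionNames.getD ((code.getD 1 ' ').toNat - 50) "")
  else
    match pvPrefixLabels.find? (fun pl => PySem.Chars.startswith cs pl.1) with
    | some pl => some pl.2
    | none => none

-- [label for label in map(classify, files) if label is not None]
def rename_list_of_files_alt (list_of_files : List String) : List String :=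
  (list_of_files.map pvClassify).reduceOption

-- ===== PRECONDITION & SPEC =====
-- Pre_ excludes exactly the inputs on which A raises ValueError: an item whose [6:-16] slice is one
-- of the five emotion codes but whose [18:-4] slice does not parse as an int.
def Pre_rename_list_of_files (list_of_files : List String) : Prop :=
  ∀ item ∈ list_of_files,
    (PySem.List.slice item.toList (some 6) (some (-16)) = ['0','2'] ∨
     PySem.List.slice item.toList (some 6) (some (-16)) = ['0','3'] ∨
     PySem.List.slice item.toList (some 6) (some (-16)) = ['0','4'] ∨
     PySem.List.slice item.toList (some 6) (some (-16)) = ['0','5'] ∨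
     PySem.List.slice item.toList (some 6) (some (-16)) = ['0','6']) →
    (PySem.Int.ofChars? (PySem.List.slice item.toList (some 18) (some (-4)))).isSome = true
instance (list_of_files : List String) : Decidable (Pre_rename_list_of_files list_of_files) := by
  unfold Pre_rename_list_of_files; infer_instance

def pvWitness_rename_list_of_files : List String :=
  ["03-01-02-01-01-01-12.wav", "angry1.wav", "happy.wav", "readme.txt"]

def Spec_rename_list_of_files (list_of_files : List String) (out : List String) : Prop := out = rename_list_of_files_alt list_of_files
instance (list_of_files : List String) (out : List String) : Decidable (Spec_rename_list_of_files list_of_files out) := by unfold Spec_rename_list_of_files; infer_instance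

-- ===== CLAIM (what is proved, stated in full; the proofs are below) =====
def Claim_equal_rename_list_of_files : Prop := ∀ (list_of_files : List String), Dom_rename_list_of_files list_of_files → Pre_rename_list_of_files list_of_files → Spec_rename_list_of_files list_of_files (rename_list_of_files list_of_files)

-- ===== LEMMAS AND PROOFS =====

lemma pv_startswith_take (cs p : List Char) :
    PySem.Chars.startswith cs p = true ↔ cs.take p.length = p := by
  rw [PySem.Chars.startswith_iff, List.prefix_iff_eq_take]; exact comm

lemma pv_sw_eq (cs p : List Char) :
    PySem.Chars.startswith cs p = decide (cs.take p.length = p) := by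
  cases hb : PySem.Chars.startswith cs p
  · rw [eq_comm, decide_eq_false_iff_not]
    intro hc
    rw [← pv_startswith_take cs p] at hc
    simp [hb] at hc
  · rw [eq_comm, decide_eq_true_iff]
    exact (pv_startswith_take cs p).mp hb

lemma pv_char_eq_of_toNat {c d : Char} (h : c.toNat = d.toNat) : c = d := by
  apply Char.ext
  apply UInt32.toBitVec_inj.mp
  exact BitVec.toNat_inj.mp h

-- a char c with '2' ≤ c ≤ '6' is one of the five digits
lemma pv_char_cases (c : Char) (h2 : '2' ≤ c) (h6 : c ≤ '6') :
    c = '2' ∨ c = '3' ∨ c = '4' ∨ c = '5' ∨ c = '6' := by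
  have hl : 50 ≤ c.toNat := h2
  have hr : c.toNat ≤ 54 := h6
  have h : c.toNat = 50 ∨ c.toNat = 51 ∨ c.toNat = 52 ∨ c.toNat = 53 ∨ c.toNat = 54 := by omega
  rcases h with h | h | h | h | h
  · exact Or.inl (pv_char_eq_of_toNat h)
  · exact Or.inr (Or.inl (pv_char_eq_of_toNat h))
  · exact Or.inr (Or.inr (Or.inl (pv_char_eq_of_toNat h)))
  · exact Or.inr (Or.inr (Or.inr (Or.inl (pv_char_eq_of_toNat h))))
  · exact Or.inr (Or.inr (Or.inr (Or.inr (pv_char_eq_of_toNat h))))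

-- per-item agreement: A's loop body produces exactly classify's optional label
lemma pv_step_eq (item : String) :
    pvStepA item = (pvClassify item).toList := by
  simp only [pvStepA, pvClassify]
  generalize PySem.List.slice item.toList (some 6) (some (-16)) = code
  generalize (PySem.Int.ofChars? (PySem.List.slice item.toList (some 18) (some (-4)))).getD 0 = n
  have hmod := PySem.Int.mod_two_eq n
  by_cases h2 : code = ['0','2']
  · subst h2; rcases hmod with hm | hm <;> rw [hm] <;> norm_num [pvGenders, pvEmotionNames, List.getD, Char.le_def] <;> rfl
  · by_cases h3 : code = ['0','3']
    · subst h3; rcases hmod with hm | hm <;> rw [hm] <;> norm_num [pvGenders, pvEmotionNames, List.getD, Char.le_def] <;> rfl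
    · by_cases h4 : code = ['0','4']
      · subst h4; rcases hmod with hm | hm <;> rw [hm] <;> norm_num [pvGenders, pvEmotionNames, List.getD, Char.le_def] <;> rfl
      · by_cases h5 : code = ['0','5']
        · subst h5; rcases hmod with hm | hm <;> rw [hm] <;> norm_num [pvGenders, pvEmotionNames, List.getD, Char.le_def] <;> rfl
        · by_cases h6 : code = ['0','6']
          · subst h6; rcases hmod with hm | hm <;> rw [hm] <;> norm_num [pvGenders, pvEmotionNames, List.getD, Char.le_def] <;> rfl
          · -- code is not one of the five: classify's guard must fail
            have hguard : ¬ (code.length = 2 ∧ code.getD 0 ' ' = '0' ∧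
                '2' ≤ code.getD 1 ' ' ∧ code.getD 1 ' ' ≤ '6') := by
              rintro ⟨hlen, h0, hlo, hhi⟩
              match code, hlen with
              | [c0, c1], _ =>
                simp [List.getD] at h0 hlo hhi
                subst h0
                rcases pv_char_cases c1 hlo hhi with h | h | h | h | h <;> subst h <;>
                  simp_all
            have ht1 : PySem.List.slice item.toList none (some 1) = item.toList.take 1 := by
              rw [PySem.List.slice_to item.toList (by norm_num)]; rfl
            have ht2 : PySem.List.slice item.toList none (some 2) = item.toList.take 2 := by
              rw [PySem.List.slice_to item.toList (by norm_num)]; rfl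
            simp only [h2, h3, h4, h5, h6, false_and, if_false, hguard, ht1, ht2]
            by_cases ha : item.toList.take 1 = ['a']
            · simp [ha, pvPrefixLabels, pv_sw_eq]
            · by_cases hf : item.toList.take 1 = ['f']
              · simp [hf, List.find?, pvPrefixLabels, pv_sw_eq]
              · by_cases hh : item.toList.take 1 = ['h']
                · simp [hh, List.find?, pvPrefixLabels, pv_sw_eq]
                · by_cases hsa : item.toList.take 2 = ['s','a']
                  · simp [ha, hf, hh, hsa, List.find?, pvPrefixLabels, pv_sw_eq]
                  · simp [ha, hf, hh, hsa, List.find?, pvPrefixLabels, pv_sw_eq]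

lemma pv_fold_eq (l : List String) (acc : List String) :
    l.foldl (fun acc item => acc ++ pvStepA item) acc
      = acc ++ (l.map pvClassify).reduceOption := by
  induction l generalizing acc with
  | nil => simp [List.reduceOption]
  | cons x xs ih =>
      simp only [List.foldl_cons, List.map_cons]
      rw [ih, pv_step_eq x]
      cases pvClassify x <;> simp [List.reduceOption]

-- ===== VERDICT (by name: the statement is the Claim_ definition above) =====
theorem rename_list_of_files_spec : Claim_equal_rename_list_of_files := by
  intro l _ _
  unfold Spec_rename_list_of_files rename_list_of_files rename_list_of_files_alt
  simpa using pv_fold_eq l []
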